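-- pv_equiv track=rewrite | github.com/Jean-KOUAGOU/Programming | programmingfiles/conjugates.py | f
-- ===== SOURCE A (Python) =====
-- def f(l):
-- 	if len(l)!=1:
-- 		L=[]
-- 		a1=len(l)
-- 		L+=[a1]
-- 		count=1
-- 		while len(L)<max(l):
-- 			c=1
-- 			for j in range(2,max(l)+1):
-- 				for k in range(1, len(l)):
-- 					if l[k]>=j:
-- 						c+=1
-- 				L+=[c]
-- 				c=1
-- 		return L
-- 	else:
-- 		return l
-- ===== SOURCE B (Python) =====
-- def f(l):
--     if len(l) == 1:
--         return l
--     res = [len(l)]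
--     m = max(l)
--     tail = sorted(l[1:])
--     n = len(tail)
--     i = 0
--     for j in range(2, m + 1):
--         while i < n and tail[i] < j:
--             i += 1
--         res.append(n - i + 1)
--     return res
-- ===== Notes on version B (the rewrite author's own statement) =====
-- stated objective: faster
-- what changed: Replace the nested rescan (for each threshold j from 2 to max, scan the whole tail counting elements >= j) by sorting the tail once and sweeping a single pointer across it while j increases, so each tail element is passed once.
-- outside the precondition, e.g. on f([]): A raises ValueError, B raises ValueError
import Mathlib
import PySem

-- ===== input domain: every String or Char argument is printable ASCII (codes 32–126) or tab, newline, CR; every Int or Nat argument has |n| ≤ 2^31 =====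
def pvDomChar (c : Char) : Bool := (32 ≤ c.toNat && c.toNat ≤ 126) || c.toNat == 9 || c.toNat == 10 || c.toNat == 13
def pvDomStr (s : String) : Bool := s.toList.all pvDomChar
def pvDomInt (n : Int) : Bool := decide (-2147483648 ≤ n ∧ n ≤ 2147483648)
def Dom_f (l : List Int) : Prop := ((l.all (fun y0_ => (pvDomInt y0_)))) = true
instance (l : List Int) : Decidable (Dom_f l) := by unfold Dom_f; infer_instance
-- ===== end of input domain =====

-- B sorts l[1:] once and sweeps one pointer over it while the threshold j grows,
-- instead of A's full rescan of the tail for every threshold (objective: faster).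

-- ===== PORT A =====
-- inner 'for k in range(1, len(l)): if l[k] >= j: c += 1' starting from c = 1
def fInner (l : List Int) (j : Int) : Int :=
  (PySem.List.pyRange 1 (l.length : Int) 1).foldl
    (fun c k => if PySem.List.pyGetD l k 0 ≥ j then c + 1 else c) 1

-- 'for j in range(2, max(l)+1): ... L += [c]'
def fForJ (l : List Int) (m : Int) (L : List Int) : List Int :=
  (PySem.List.pyRange 2 (m + 1) 1).foldl (fun acc j => acc ++ [fInner l j]) L

-- the while loop; fuel-based (one pass of the inner for loop already brings len(L) to m)
def fWhile (l : List Int) (m : Int) : Nat → List Int → List Int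
  | 0, L => L
  | fuel + 1, L => if (L.length : Int) < m then fWhile l m fuel (fForJ l m L) else L

def f (l : List Int) : List Int :=
  if l.length ≠ 1 then
    match PySem.List.max? l (fun x => x) with
    | none => []          -- max([]) raises ValueError: excluded by Pre_f
    | some m => fWhile l m (m.toNat + 1) [(l.length : Int)]
  else l

-- ===== PORT B =====
-- the pointer advance 'while i < n and tail[i] < j: i += 1', as consuming the sorted tail
def dropLt (j : Int) : List Int → List Int
  | [] => []
  | x :: xs => if x < j then dropLt j xs else x :: xs

-- 'for j in range(2, m+1): advance pointer; res.append(n - i + 1)'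
def loopB : List Int → List Int → List Int → List Int
  | [], _, res => res
  | j :: js, rem, res =>
      let rem' := dropLt j rem
      loopB js rem' (res ++ [(rem'.length : Int) + 1])

def f_alt (l : List Int) : List Int :=
  if l.length = 1 then l
  else
    match PySem.List.max? l (fun x => x) with
    | none => []          -- max([]) raises ValueError: excluded by Pre_f
    | some m =>
      loopB (PySem.List.pyRange 2 (m + 1) 1)
        (PySem.List.sorted (l.drop 1) (fun x => x) false)
        [(l.length : Int)]

-- ===== PRECONDITION & SPEC =====
-- Pre_f excludes only the empty list, on which both A and B raise ValueError (max([])).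
def Pre_f (l : List Int) : Prop := l ≠ []
instance (l : List Int) : Decidable (Pre_f l) := by unfold Pre_f; infer_instance
def pvWitness_f : List Int := [2, 1, 3]

def Spec_f (l : List Int) (out : List Int) : Prop := out = f_alt l
instance (l : List Int) (out : List Int) : Decidable (Spec_f l out) := by unfold Spec_f; infer_instance

-- ===== CLAIM (what is proved, stated in full; the proofs are below) =====
def Claim_equal_f : Prop := ∀ (l : List Int), Dom_f l → Pre_f l → Spec_f l (f l)

-- ===== LEMMAS AND PROOFS =====

-- dropping the <j' prefix then the <j prefix is dropping the <j prefix (j' ≤ j)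
lemma dropLt_dropLt (j j' : Int) (h : j' ≤ j) (s : List Int) :
    dropLt j (dropLt j' s) = dropLt j s := by
  induction s with
  | nil => rfl
  | cons x xs ih =>
    by_cases hx : x < j'
    · simp [dropLt, hx, if_pos (lt_of_lt_of_le hx h), ih]
    · by_cases hx2 : x < j
      · simp [dropLt, hx, hx2]
      · simp [dropLt, hx, hx2]

-- on an ascending list, the suffix of elements ≥ j has length countP (j ≤ ·)
lemma dropLt_length_sorted (j : Int) (s : List Int) (hs : s.Pairwise (· ≤ ·)) :
    (dropLt j s).length = s.countP (fun x => decide (j ≤ x)) := by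
  induction s with
  | nil => rfl
  | cons x xs ih =>
    rcases List.pairwise_cons.mp hs with ⟨hall, htail⟩
    by_cases hx : x < j
    · have : ¬ (j ≤ x) := by omega
      simp [dropLt, hx, this, ih htail]
    · have hjx : j ≤ x := by omega
      have hlen : xs.countP (fun x => decide (j ≤ x)) = xs.length := by
        apply List.countP_eq_length.mpr
        intro y hy
        exact decide_eq_true (le_trans hjx (hall y hy))
      simp [dropLt, hx, hjx, hlen]

-- the sweep over ascending thresholds computes each suffix length independently
lemma loopB_eq (js : List Int) (s : List Int) :
    ∀ (rem res : List Int), js.Pairwise (· ≤ ·) →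
      (∀ j ∈ js, dropLt j rem = dropLt j s) →
      loopB js rem res = res ++ js.map (fun j => ((dropLt j s).length : Int) + 1) := by
  induction js with
  | nil => intro rem res _ _; simp [loopB]
  | cons j js ih =>
    intro rem res hp h
    rcases List.pairwise_cons.mp hp with ⟨hall, hp'⟩
    have hj : dropLt j rem = dropLt j s := h j (List.mem_cons_self ..)
    have h' : ∀ j' ∈ js, dropLt j' (dropLt j rem) = dropLt j' s := by
      intro j' hj'
      rw [hj, dropLt_dropLt j' j (hall j' hj') s]
    simp only [loopB, hj]
    rw [ih (dropLt j s) (res ++ [((dropLt j s).length : Int) + 1]) hp' (by rw [← hj]; exact h')]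
    simp

-- A's inner count equals 1 + countP over the tail
lemma fInner_eq (l : List Int) (j : Int) :
    fInner l j = 1 + ((l.drop 1).countP (fun x => decide (j ≤ x)) : Int) := by
  unfold fInner
  rw [PySem.List.foldl_pyRange_pyGetD' l 0 (fun c x => if x ≥ j then c + 1 else c) 1
      (by norm_num : (0:Int) ≤ 1)]
  have := PySem.List.foldl_ite_add_one (fun x => x ≥ j) (l.drop 1) 1
  simpa [ge_iff_le] using this

theorem f_spec_aux : ∀ (l : List Int), Pre_f l → f l = f_alt l := by
  intro l hne
  by_cases hlen : l.length = 1
  · simp [f, f_alt, hlen]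
  · have hmax : ∃ m, PySem.List.max? l (fun x => x) = some m := by
      cases hm : PySem.List.max? l (fun x => x) with
      | none => exact absurd ((PySem.List.max?_eq_none_iff l (fun x => x)).mp hm) hne
      | some m => exact ⟨m, rfl⟩
    rcases hmax with ⟨m, hm⟩
    simp only [f, f_alt, hlen, ne_eq, not_false_iff, if_pos, if_neg, hm]
    set s := PySem.List.sorted (l.drop 1) (fun x => x) false with hs
    have hsp : s.Pairwise (· ≤ ·) := PySem.List.sorted_pairwise (l.drop 1) (fun x => x)
    have hperm : s.Perm (l.drop 1) := PySem.List.sorted_perm (l.drop 1) (fun x => x) false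
    have hrange : (PySem.List.pyRange 2 (m + 1) 1).Pairwise (· ≤ ·) :=
      (PySem.List.pairwise_lt_pyRange_one 2 (m + 1)).imp (fun h => le_of_lt h)
    have hloop := loopB_eq (PySem.List.pyRange 2 (m + 1) 1) s s [(l.length : Int)] hrange
      (fun j _ => rfl)
    by_cases hm2 : 2 ≤ m
    · -- one pass of the for loop fills L up to length m
      have hfor : fForJ l m [(l.length : Int)] =
          [(l.length : Int)] ++ (PySem.List.pyRange 2 (m + 1) 1).map (fInner l) := by
        unfold fForJ
        exact PySem.List.foldl_append_singleton_eq_map ..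
      have hlen1 : ((([(l.length : Int)] : List Int).length : Int)) < m := by
        simp; omega
      have hlenfull : ¬ ((((fForJ l m [(l.length : Int)]).length : Int)) < m) := by
        rw [hfor]
        simp [PySem.List.length_pyRange_one]
        omega
      obtain ⟨k, hk⟩ : ∃ k, m.toNat = k + 1 := ⟨m.toNat - 1, by omega⟩
      rw [show m.toNat + 1 = (k + 1) + 1 from by omega]
      simp only [fWhile, if_pos hlen1, if_neg hlenfull]
      rw [hfor, hloop]
      congr 1
      apply List.map_congr_left
      intro j _
      rw [fInner_eq]
      have hc : s.countP (fun x => decide (j ≤ x)) = (l.drop 1).countP (fun x => decide (j ≤ x)) :=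
        hperm.countP_eq _
      rw [dropLt_length_sorted j s hsp, hc]
      omega
    · -- m < 2 : the while loop is never entered, and the range of thresholds is empty
      have hr : PySem.List.pyRange 2 (m + 1) 1 = [] :=
        PySem.List.pyRange_one_eq_nil (by omega)
      rw [hr] at hloop ⊢
      simp only [fWhile]
      rw [if_neg (by simp; omega)]
      simpa using hloop.symm

-- ===== VERDICT (by name: the statement is the Claim_ definition above) =====
theorem f_spec : Claim_equal_f := by
  intro l _ hpre
  exact (f_spec_aux l hpre).symm ▸ rfl
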